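-- pv_equiv track=rewrite | github.com/Maxxenniii/Diversidade_Complexidade_Lexica | codigos_python/codigos/syllable.py | _is_occlusive
-- ===== SOURCE A (Python) =====
-- OCC = {"p", "t", "b", "d"}
--
-- OCC_BIG = {"ca", "co", "cu", "ga", "go", "gu", "gú", "que", "qui", "gue", "gui"}
--
-- def _is_occlusive(w: str, i: int) -> bool:
--     tail = w[i:]
--     for s in OCC | OCC_BIG:
--         if len(s) == 1:
--             if tail.startswith(s):
--                 return True
--         elif len(s) == 2:
--             if len(tail) >= 2 and tail.startswith(s):
--                 return True
--         else:  # 3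
--             if len(tail) >= 3 and tail.startswith(s):
--                 return True
--     return False
-- ===== SOURCE B (Python) =====
-- OCC = {"p", "t", "b", "d"}
--
-- OCC_BIG = {"ca", "co", "cu", "ga", "go", "gu", "gú", "que", "qui", "gue", "gui"}
--
-- def _is_occlusive(w: str, i: int) -> bool:
--     # Decision tree over the characters at position i (a hand-unrolled trie of the
--     # patterns): branch on the first character, then on the next one(s).
--     # Note "gu" subsumes "gue"/"gui", so the 'g' branch needs only one lookahead.
--     t = w[i:]
--     if not t:
--         return False
--     c0 = t[0]
--     if c0 in "ptbd":
--         return True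
--     if c0 == "c":
--         return len(t) >= 2 and t[1] in "aou"
--     if c0 == "g":
--         return len(t) >= 2 and t[1] in ("a", "o", "u", "ú")
--     if c0 == "q":
--         return len(t) >= 3 and t[1] == "u" and t[2] in "ei"
--     return False
-- ===== Notes on version B (the rewrite author's own statement) =====
-- stated objective: alternative
-- what changed: Replaces the scan over the pattern set with a hand-unrolled decision tree (trie) that branches on the characters at position i, exploiting that 'gu' subsumes 'gue'/'gui'.
import Mathlib
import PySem

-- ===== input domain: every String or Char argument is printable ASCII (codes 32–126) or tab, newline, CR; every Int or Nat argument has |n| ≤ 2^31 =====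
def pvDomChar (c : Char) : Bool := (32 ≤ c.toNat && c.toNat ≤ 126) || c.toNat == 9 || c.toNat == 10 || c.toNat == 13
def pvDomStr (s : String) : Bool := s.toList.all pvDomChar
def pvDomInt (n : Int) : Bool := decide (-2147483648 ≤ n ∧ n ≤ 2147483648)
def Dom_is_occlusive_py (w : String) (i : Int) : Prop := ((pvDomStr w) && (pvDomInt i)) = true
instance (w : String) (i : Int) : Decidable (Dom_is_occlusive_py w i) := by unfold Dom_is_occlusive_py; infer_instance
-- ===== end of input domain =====

-- B replaces A's loop over the pattern set with a hand-unrolled character decision tree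
-- (trie) on the tail, using that "gu" subsumes "gue"/"gui" (objective: alternative).

-- ===== PORT A =====
def occAllPatterns : List (List Char) :=
  [['p'], ['t'], ['b'], ['d'],
   ['c','a'], ['c','o'], ['c','u'], ['g','a'], ['g','o'], ['g','u'], ['g','\u00fa'],
   ['q','u','e'], ['q','u','i'], ['g','u','e'], ['g','u','i']]

def is_occlusive_py (w : String) (i : Int) : Bool :=
  let tail := PySem.Chars.slice w.toList (some i) none     -- w[i:]
  occAllPatterns.foldl (fun acc s =>
    acc ||
      (if s.length = 1 then s.isPrefixOf tail
       else if s.length = 2 then decide (2 ≤ tail.length) && s.isPrefixOf tail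
       else decide (3 ≤ tail.length) && s.isPrefixOf tail)) false

-- ===== PORT B =====
-- B: decision tree on the characters of the tail (hand-unrolled trie of the patterns)
def is_occlusive_py_alt (w : String) (i : Int) : Bool :=
  match PySem.Chars.slice w.toList (some i) none with    -- w[i:]
  | [] => false
  | c0 :: rest =>
    if c0 == 'p' || c0 == 't' || c0 == 'b' || c0 == 'd' then true
    else if c0 == 'c' then
      match rest with
      | c1 :: _ => c1 == 'a' || c1 == 'o' || c1 == 'u'
      | [] => false
    else if c0 == 'g' then
      match rest with
      | c1 :: _ => c1 == 'a' || c1 == 'o' || c1 == 'u' || c1 == '\u00fa'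
      | [] => false
    else if c0 == 'q' then
      match rest with
      | c1 :: c2 :: _ => c1 == 'u' && (c2 == 'e' || c2 == 'i')
      | _ => false
    else false

-- ===== PRECONDITION & SPEC =====
def Spec_is_occlusive_py (w : String) (i : Int) (out : Bool) : Prop := out = is_occlusive_py_alt w i
instance (w : String) (i : Int) (out : Bool) : Decidable (Spec_is_occlusive_py w i out) := by unfold Spec_is_occlusive_py; infer_instance

-- ===== CLAIM (what is proved, stated in full; the proofs are below) =====
def Claim_equal_is_occlusive_py : Prop := ∀ (w : String) (i : Int), Dom_is_occlusive_py w i → Spec_is_occlusive_py w i (is_occlusive_py w i)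

-- ===== LEMMAS AND PROOFS =====

-- the two ports agree for an arbitrary tail t: A's or-fold over the patterns equals
-- B's character decision tree
theorem occ_tail_eq (t : List Char) :
    occAllPatterns.foldl (fun acc s =>
      acc ||
        (if s.length = 1 then s.isPrefixOf t
         else if s.length = 2 then decide (2 ≤ t.length) && s.isPrefixOf t
         else decide (3 ≤ t.length) && s.isPrefixOf t)) false
    = (match t with
       | [] => false
       | c0 :: rest =>
         if c0 == 'p' || c0 == 't' || c0 == 'b' || c0 == 'd' then true
         else if c0 == 'c' then
           match rest with
           | c1 :: _ => c1 == 'a' || c1 == 'o' || c1 == 'u'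
           | [] => false
         else if c0 == 'g' then
           match rest with
           | c1 :: _ => c1 == 'a' || c1 == 'o' || c1 == 'u' || c1 == '\u00fa'
           | [] => false
         else if c0 == 'q' then
           match rest with
           | c1 :: c2 :: _ => c1 == 'u' && (c2 == 'e' || c2 == 'i')
           | _ => false
         else false) := by
  match t with
  | [] => rfl
  | [a] =>
    simp only [occAllPatterns, List.foldl, List.isPrefixOf, List.length, Bool.false_or,
      Bool.and_true, Bool.beq_eq_decide_eq]
    norm_num
    simp [eq_comm]
  | [a, b] =>
    simp only [occAllPatterns, List.foldl, List.isPrefixOf, List.length, Bool.false_or,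
      Bool.and_true, Bool.beq_eq_decide_eq]
    norm_num
    split_ifs <;>
      simp_all [eq_comm, Bool.and_or_distrib_left, Bool.or_assoc]
  | a :: b :: c :: r =>
    simp only [occAllPatterns, List.foldl, List.isPrefixOf, List.length, Bool.false_or,
      Bool.and_true, Bool.beq_eq_decide_eq]
    norm_num
    split_ifs <;>
      simp_all [eq_comm, Bool.and_or_distrib_left, Bool.or_assoc] <;>
      by_cases hbu : b = 'u' <;> simp_all

-- ===== VERDICT (by name: the statement is the Claim_ definition above) =====
theorem is_occlusive_py_spec : Claim_equal_is_occlusive_py := by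
  intro w i _
  unfold Spec_is_occlusive_py is_occlusive_py is_occlusive_py_alt
  exact occ_tail_eq _
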